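-- pv_equiv track=rewrite | github.com/Wizmann/ACM-ICPC | Leetcode/Algorithm/python/3000/03876. Construct Uniform Parity Array II.py | uniformArray
-- ===== SOURCE A (Python) =====
-- INF = 10 ** 10
--
-- def uniformArray(nums1):
--     min_odd = INF
--
--     for num in nums1:
--         if (num & 1) and num < min_odd:
--             min_odd = num
--
--     if min_odd == INF:
--         return True
--
--     for num in nums1:
--         if not (num & 1) and num <= min_odd:
--             return False
--
--     return True
-- ===== SOURCE B (Python) =====
-- INF = 10 ** 10
--
-- def uniformArray(nums1):
--     # One pass: track the minimum odd and minimum even element simultaneously.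
--     min_odd = INF
--     min_even = INF
--     for num in nums1:
--         if num & 1:
--             if num < min_odd:
--                 min_odd = num
--         else:
--             if num < min_even:
--                 min_even = num
--     if min_odd == INF:
--         return True
--     return min_even > min_odd
-- ===== Notes on version B (the rewrite author's own statement) =====
-- stated objective: simpler
-- what changed: Single pass maintaining both min_odd and min_even with a final comparison, replacing A's two sequential scans and the early-return second loop.
import Mathlib
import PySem

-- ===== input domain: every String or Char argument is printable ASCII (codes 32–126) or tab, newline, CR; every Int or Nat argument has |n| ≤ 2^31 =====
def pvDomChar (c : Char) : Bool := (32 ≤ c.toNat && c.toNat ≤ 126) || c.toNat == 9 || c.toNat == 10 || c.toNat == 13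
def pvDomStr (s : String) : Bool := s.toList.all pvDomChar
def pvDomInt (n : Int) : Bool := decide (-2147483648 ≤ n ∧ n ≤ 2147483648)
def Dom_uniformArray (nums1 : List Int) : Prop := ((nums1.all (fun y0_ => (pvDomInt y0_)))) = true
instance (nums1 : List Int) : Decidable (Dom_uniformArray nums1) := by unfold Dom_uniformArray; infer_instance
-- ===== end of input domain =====

-- B: one pass maintaining min_odd and min_even together, final comparison (alternative decomposition, same cost).
-- ===== PORT A =====
def uaINF : Int := 10 ^ 10

-- first loop of A: min over odd elements with strict '< min_odd' guard
def uaOddFold (m : Int) (l : List Int) : Int :=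
  l.foldl (fun m num => if num % 2 = 1 ∧ num < m then num else m) m

-- second loop of A: early-return False on an even element ≤ min_odd
def uaLoop2 (min_odd : Int) : List Int → Bool
  | [] => true
  | num :: t => if ¬ (num % 2 = 1) ∧ num ≤ min_odd then false else uaLoop2 min_odd t

def uniformArray (nums1 : List Int) : Bool :=
  let min_odd := uaOddFold uaINF nums1
  if min_odd = uaINF then true
  else uaLoop2 min_odd nums1

-- ===== PORT B =====
def ubStep (p : Int × Int) (num : Int) : Int × Int :=
  if num % 2 = 1 then (if num < p.1 then (num, p.2) else p)
  else (if num < p.2 then (p.1, num) else p)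

def uniformArray_alt (nums1 : List Int) : Bool :=
  let p := nums1.foldl ubStep (uaINF, uaINF)
  if p.1 = uaINF then true
  else decide (p.2 > p.1)

-- ===== PRECONDITION & SPEC =====
def Spec_uniformArray (nums1 : List Int) (out : Bool) : Prop := out = uniformArray_alt nums1
instance (nums1 : List Int) (out : Bool) : Decidable (Spec_uniformArray nums1 out) := by unfold Spec_uniformArray; infer_instance

-- ===== CLAIM (what is proved, stated in full; the proofs are below) =====
def Claim_equal_uniformArray : Prop := ∀ (nums1 : List Int), Dom_uniformArray nums1 → Spec_uniformArray nums1 (uniformArray nums1)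

-- ===== LEMMAS AND PROOFS =====

-- even-min accumulator, for reasoning about the pair fold's second component
def ubEvenFold (e : Int) (l : List Int) : Int :=
  l.foldl (fun e num => if ¬ (num % 2 = 1) ∧ num < e then num else e) e

theorem ubStep_pair (l : List Int) : ∀ (m e : Int),
    l.foldl ubStep (m, e) = (uaOddFold m l, ubEvenFold e l) := by
  induction l with
  | nil => intro m e; rfl
  | cons n t ih =>
    intro m e
    simp only [List.foldl_cons, uaOddFold, ubEvenFold, ubStep]
    by_cases h : n % 2 = 1 <;> by_cases h2 : n < m <;> by_cases h3 : n < e <;>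
      simp [h, h2, h3, ih, uaOddFold, ubEvenFold]

theorem uaOddFold_le (l : List Int) : ∀ (m : Int), uaOddFold m l ≤ m := by
  induction l with
  | nil => intro m; simp [uaOddFold]
  | cons n t ih =>
    intro m
    simp only [uaOddFold, List.foldl_cons]
    split
    · exact le_trans (ih n) (le_of_lt (by omega))
    · exact ih m

theorem ubEvenFold_le (l : List Int) : ∀ (e : Int), ubEvenFold e l ≤ e := by
  induction l with
  | nil => intro e; simp [ubEvenFold]
  | cons n t ih =>
    intro e
    simp only [ubEvenFold, List.foldl_cons]
    split
    · exact le_trans (ih n) (le_of_lt (by omega))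
    · exact ih e

theorem ubEvenFold_cons (e n : Int) (t : List Int) :
    ubEvenFold e (n :: t) = ubEvenFold (if ¬ (n % 2 = 1) ∧ n < e then n else e) t := rfl

theorem uaLoop2_eq (mo : Int) (l : List Int) : ∀ (e : Int), mo < e →
    uaLoop2 mo l = decide (ubEvenFold e l > mo) := by
  induction l with
  | nil => intro e he; simp [uaLoop2, ubEvenFold]; omega
  | cons n t ih =>
    intro e he
    rw [ubEvenFold_cons]
    simp only [uaLoop2]
    by_cases h : n % 2 = 1
    · rw [if_neg (fun hc : ¬ (n % 2 = 1) ∧ n ≤ mo => hc.1 h),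
        if_neg (fun hc : ¬ (n % 2 = 1) ∧ n < e => hc.1 h)]
      exact ih e he
    · by_cases h2 : n ≤ mo
      · rw [if_pos ⟨h, h2⟩, if_pos ⟨h, by omega⟩]
        have hb := ubEvenFold_le t n
        have hng : ¬ (ubEvenFold n t > mo) := by omega
        simp [hng]
      · rw [if_neg (fun hc : ¬ (n % 2 = 1) ∧ n ≤ mo => h2 hc.2)]
        by_cases h3 : n < e
        · rw [if_pos ⟨h, h3⟩]; exact ih n (by omega)
        · rw [if_neg (fun hc : ¬ (n % 2 = 1) ∧ n < e => h3 hc.2)]; exact ih e he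

-- ===== VERDICT (by name: the statement is the Claim_ definition above) =====
theorem uniformArray_spec : Claim_equal_uniformArray := by
  intro nums1 _
  unfold Spec_uniformArray uniformArray uniformArray_alt
  rw [ubStep_pair]
  simp only
  by_cases h : uaOddFold uaINF nums1 = uaINF
  · simp [h]
  · have hle : uaOddFold uaINF nums1 ≤ uaINF := uaOddFold_le nums1 uaINF
    have hlt : uaOddFold uaINF nums1 < uaINF := lt_of_le_of_ne hle h
    simp only [h, ite_false]
    exact uaLoop2_eq _ nums1 uaINF hlt
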